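-- pv_equiv track=rewrite | github.com/nipurnapatel-daiict/Docprompting_202201061 | Docprompting_Implementation/dataflow_match.py | normalize_dataflow
-- ===== SOURCE A (Python) =====
-- def normalize_dataflow(dataflow):
--     var_dict = {} # Maps original var names to normalized var_X names
--     i = 0
--     normalized_dataflow = []
--     for item in dataflow: # item is (var_name, var_pos, relationship, parent_names, parent_pos)
--         var_name = item[0]
--         relationship = item[2]
--         par_vars_name_list = item[3] # List of names of parent variables
--
--         # Normalize parent variable names
--         for name in par_vars_name_list:
--             if name not in var_dict:
--                 var_dict[name] = 'var_'+str(i)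
--                 i += 1
--         # Normalize current variable name
--         if var_name not in var_dict:
--             var_dict[var_name] = 'var_'+str(i)
--             i+= 1
--
--         # Create the normalized tuple: (normalized_var_name, relationship, list_of_normalized_parent_names)
--         normalized_dataflow.append((var_dict[var_name], relationship, [var_dict[x] for x in par_vars_name_list]))
--     return normalized_dataflow
-- ===== SOURCE B (Python) =====
-- def normalize_dataflow(dataflow):
--     # The normalized name of a variable is determined purely by its first-occurrence
--     # position in the flattened name stream (parents in list order, then the variable,
--     # item by item): flatten -> ordered dedup -> rank by position -> map lookups.
--     stream = [n for item in dataflow for n in list(item[3]) + [item[0]]]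
--     order = list(dict.fromkeys(stream))
--     rank = {name: 'var_' + str(k) for k, name in enumerate(order)}
--     return [(rank[item[0]], item[2], [rank[x] for x in item[3]])
--             for item in dataflow]
-- ===== Notes on version B (the rewrite author's own statement) =====
-- stated objective: alternative
-- what changed: A threads a mutable counter+dict through one fused loop; B has no counter and no conditional insertion at all: it flattens the names into one stream (parents then variable, per item), ordered-dedups that stream, ranks each name by its position in the deduped list, and maps lookups over the input.
import Mathlib
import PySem

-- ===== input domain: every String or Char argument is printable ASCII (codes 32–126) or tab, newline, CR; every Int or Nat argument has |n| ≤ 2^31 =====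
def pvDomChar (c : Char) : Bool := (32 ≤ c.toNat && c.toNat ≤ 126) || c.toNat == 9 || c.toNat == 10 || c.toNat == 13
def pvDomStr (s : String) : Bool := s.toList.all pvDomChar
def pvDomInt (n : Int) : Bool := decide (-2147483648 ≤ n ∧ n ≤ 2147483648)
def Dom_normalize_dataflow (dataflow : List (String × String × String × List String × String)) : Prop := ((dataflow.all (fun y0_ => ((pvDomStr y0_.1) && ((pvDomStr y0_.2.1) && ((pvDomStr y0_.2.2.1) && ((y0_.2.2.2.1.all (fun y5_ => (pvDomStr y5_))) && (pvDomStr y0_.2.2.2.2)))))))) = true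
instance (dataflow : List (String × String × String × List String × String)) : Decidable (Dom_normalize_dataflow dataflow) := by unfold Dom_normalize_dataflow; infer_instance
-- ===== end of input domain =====

-- B replaces A's fused counter+dict loop by flatten → ordered dedup → rank-by-position → map;
-- return values are identical (alternative algorithm, no speed claim).

-- ===== PORT A =====
-- A: one fused loop carrying (var_dict, i, accumulated output).
def normalize_dataflow (dataflow : List (String × String × String × List String × String)) : List (String × String × List String) :=
  (dataflow.foldl
    (fun (st : PySem.Dict String String × Int × List (String × String × List String)) item =>
      let q1 := item.2.2.2.1.foldl
        (fun (q : PySem.Dict String String × Int) name =>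
          if q.1.contains name then q
          else (q.1.insert name ("var_" ++ PySem.Int.toStr q.2), q.2 + 1))
        (st.1, st.2.1)
      let q2 := if q1.1.contains item.1 then q1
                else (q1.1.insert item.1 ("var_" ++ PySem.Int.toStr q1.2), q1.2 + 1)
      (q2.1, q2.2, st.2.2 ++
        [(q2.1.getD item.1 "", item.2.2.1, item.2.2.2.1.map (fun x => q2.1.getD x ""))]))
    (PySem.Dict.empty, 0, [])).2.2

-- ===== PORT B =====
-- B: flatten the name stream, ordered-dedup it, rank each name by position, map lookups.
def normalize_dataflow_alt (dataflow : List (String × String × String × List String × String)) : List (String × String × List String) :=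
  let stream := dataflow.flatMap (fun item => item.2.2.2.1 ++ [item.1])
  let order := PySem.List.dedup stream
  let rank := (PySem.List.enumerate order).foldl
      (fun d p => d.insert p.2 ("var_" ++ PySem.Int.toStr p.1)) PySem.Dict.empty
  dataflow.map (fun item =>
    (rank.getD item.1 "", item.2.2.1, item.2.2.2.1.map (fun x => rank.getD x "")))

-- ===== PRECONDITION & SPEC =====
def Spec_normalize_dataflow (dataflow : List (String × String × String × List String × String)) (out : List (String × String × List String)) : Prop := out = normalize_dataflow_alt dataflow
instance (dataflow : List (String × String × String × List String × String)) (out : List (String × String × List String)) : Decidable (Spec_normalize_dataflow dataflow out) := by unfold Spec_normalize_dataflow; infer_instance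

-- ===== CLAIM (what is proved, stated in full; the proofs are below) =====
def Claim_equal_normalize_dataflow : Prop := ∀ (dataflow : List (String × String × String × List String × String)), Dom_normalize_dataflow dataflow → Spec_normalize_dataflow dataflow (normalize_dataflow dataflow)

-- ===== LEMMAS AND PROOFS =====

-- named versions of the loop bodies (used only by the proofs)
def pvIns (q : PySem.Dict String String × Int) (name : String) : PySem.Dict String String × Int :=
  if q.1.contains name then q
  else (q.1.insert name ("var_" ++ PySem.Int.toStr q.2), q.2 + 1)

def pvInsItem (q : PySem.Dict String String × Int)
    (item : String × String × String × List String × String) : PySem.Dict String String × Int :=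
  pvIns (item.2.2.2.1.foldl pvIns q) item.1

def pvApply (d : PySem.Dict String String)
    (item : String × String × String × List String × String) : String × String × List String :=
  (d.getD item.1 "", item.2.2.1, item.2.2.2.1.map (fun x => d.getD x ""))

-- B's rank table built from a (nodup) order list
def pvTable (seen : List String) : PySem.Dict String String :=
  (PySem.List.enumerate seen).foldl
    (fun d p => d.insert p.2 ("var_" ++ PySem.Int.toStr p.1)) PySem.Dict.empty

lemma pvIns_mono {q : PySem.Dict String String × Int} {k v : String} (n : String)
    (h : q.1.get? k = some v) : (pvIns q n).1.get? k = some v := by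
  unfold pvIns
  split_ifs with hc
  · exact h
  · by_cases hk : k = n
    · subst hk
      rw [PySem.Dict.contains_eq_isSome_get?, h] at hc
      simp at hc
    · simpa [PySem.Dict.get?_insert_of_ne _ _ hk] using h

lemma pvFoldl_mono (l : List String) : ∀ (q : PySem.Dict String String × Int) {k v : String},
    q.1.get? k = some v → ((l.foldl pvIns q).1).get? k = some v := by
  induction l with
  | nil => intro q k v h; simpa using h
  | cons n l ih => intro q k v h; exact ih _ (pvIns_mono n h)

lemma pvInsItem_mono (item : String × String × String × List String × String)
    {q : PySem.Dict String String × Int} {k v : String}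
    (h : q.1.get? k = some v) : (pvInsItem q item).1.get? k = some v :=
  pvIns_mono _ (pvFoldl_mono _ _ h)

lemma pvFoldlItem_mono (l : List (String × String × String × List String × String)) :
    ∀ (q : PySem.Dict String String × Int) {k v : String},
    q.1.get? k = some v → ((l.foldl pvInsItem q).1).get? k = some v := by
  induction l with
  | nil => intro q k v h; simpa using h
  | cons x l ih => intro q k v h; exact ih _ (pvInsItem_mono x h)

lemma pvIns_some_self (q : PySem.Dict String String × Int) (n : String) :
    ((pvIns q n).1.get? n).isSome := by
  unfold pvIns
  split_ifs with hc
  · rw [PySem.Dict.contains_eq_isSome_get?] at hc; exact hc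
  · simp [PySem.Dict.get?_insert_self]

lemma pvFoldl_some_of_mem (l : List String) : ∀ (q : PySem.Dict String String × Int) {n : String},
    n ∈ l → ((l.foldl pvIns q).1.get? n).isSome := by
  induction l with
  | nil => intro q n h; simp at h
  | cons m l ih =>
    intro q n h
    rcases List.mem_cons.mp h with h | h
    · subst h
      rcases Option.isSome_iff_exists.mp (pvIns_some_self q n) with ⟨v, hv⟩
      simp only [List.foldl_cons]
      rw [pvFoldl_mono l _ hv]; rfl
    · exact ih _ h

lemma pvInsItem_some_var (q : PySem.Dict String String × Int)
    (item : String × String × String × List String × String) :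
    ((pvInsItem q item).1.get? item.1).isSome :=
  pvIns_some_self _ _

lemma pvInsItem_some_par (q : PySem.Dict String String × Int)
    (item : String × String × String × List String × String) {n : String}
    (h : n ∈ item.2.2.2.1) : ((pvInsItem q item).1.get? n).isSome := by
  rcases Option.isSome_iff_exists.mp (pvFoldl_some_of_mem _ q h) with ⟨v, hv⟩
  unfold pvInsItem
  rw [pvIns_mono _ hv]; rfl

-- lookups already present agree between an intermediate table and any later table
lemma pvApply_stable {d d' : PySem.Dict String String}
    (hmono : ∀ k v, d.get? k = some v → d'.get? k = some v)
    (item : String × String × String × List String × String)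
    (hvar : (d.get? item.1).isSome)
    (hpar : ∀ n ∈ item.2.2.2.1, (d.get? n).isSome) :
    pvApply d item = pvApply d' item := by
  have key : ∀ k : String, (d.get? k).isSome → d.getD k "" = d'.getD k "" := by
    intro k hk
    rcases Option.isSome_iff_exists.mp hk with ⟨v, hv⟩
    rw [PySem.Dict.getD_of_get?_eq_some _ _ hv,
        PySem.Dict.getD_of_get?_eq_some _ _ (hmono _ _ hv)]
  unfold pvApply
  refine congrArg₂ _ (key _ hvar) (congrArg _ ?_)
  exact List.map_congr_left (fun n hn => key n (hpar n hn))

-- A's fused loop, with the loop body written via the named helpers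
def pvStepA (st : PySem.Dict String String × Int × List (String × String × List String))
    (item : String × String × String × List String × String) :
    PySem.Dict String String × Int × List (String × String × List String) :=
  let q2 := pvInsItem (st.1, st.2.1) item
  (q2.1, q2.2, st.2.2 ++ [pvApply q2.1 item])

lemma normalize_dataflow_eq_named (dataflow : List (String × String × String × List String × String)) :
    normalize_dataflow dataflow =
      (dataflow.foldl pvStepA (PySem.Dict.empty, 0, [])).2.2 := by
  unfold normalize_dataflow pvStepA pvInsItem pvIns pvApply
  rfl

lemma pvMain (xs : List (String × String × String × List String × String)) :
    ∀ (q : PySem.Dict String String × Int) (acc : List (String × String × List String)),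
    (xs.foldl pvStepA (q.1, q.2, acc)).2.2 =
      acc ++ xs.map (pvApply ((xs.foldl pvInsItem q).1)) := by
  induction xs with
  | nil => intro q acc; simp
  | cons x xs ih =>
    intro q acc
    have hstep : pvStepA (q.1, q.2, acc) x =
        ((pvInsItem q x).1, (pvInsItem q x).2, acc ++ [pvApply (pvInsItem q x).1 x]) := rfl
    have happ : pvApply (pvInsItem q x).1 x =
        pvApply ((xs.foldl pvInsItem (pvInsItem q x)).1) x := by
      refine pvApply_stable (fun k v hv => pvFoldlItem_mono xs _ hv) x
        (pvInsItem_some_var q x) (fun n hn => pvInsItem_some_par q x hn)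
    calc (List.foldl pvStepA (pvStepA (q.1, q.2, acc) x) xs).2.2
        = (List.foldl pvStepA ((pvInsItem q x).1, (pvInsItem q x).2,
            acc ++ [pvApply (pvInsItem q x).1 x]) xs).2.2 := by rw [hstep]
      _ = (acc ++ [pvApply (pvInsItem q x).1 x]) ++
            xs.map (pvApply ((xs.foldl pvInsItem (pvInsItem q x)).1)) := ih _ _
      _ = acc ++ (pvApply ((xs.foldl pvInsItem (pvInsItem q x)).1) x ::
            xs.map (pvApply ((xs.foldl pvInsItem (pvInsItem q x)).1))) := by
            rw [happ]; simp
      _ = acc ++ (x :: xs).map (pvApply (((x :: xs).foldl pvInsItem q).1)) := by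
            simp

-- A's dict fold over items equals the flat fold over the name stream
lemma pvFoldlItem_eq_stream (xs : List (String × String × String × List String × String)) :
    ∀ (q : PySem.Dict String String × Int),
    xs.foldl pvInsItem q =
      (xs.flatMap (fun item => item.2.2.2.1 ++ [item.1])).foldl pvIns q := by
  induction xs with
  | nil => intro q; rfl
  | cons x xs ih =>
    intro q
    simp only [List.foldl_cons, List.flatMap_cons, List.foldl_append]
    rw [ih]
    rfl

-- pvTable grows at the end
lemma pvTable_append (seen : List String) (n : String) :
    pvTable (seen ++ [n]) =
      (pvTable seen).insert n ("var_" ++ PySem.Int.toStr (seen.length : Int)) := by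
  unfold pvTable
  rw [PySem.List.enumerate_append]
  simp [PySem.List.enumerate_cons, PySem.List.enumerate_nil, List.foldl_append]

lemma pvTable_contains (seen : List String) (n : String) :
    (pvTable seen).contains n = decide (n ∈ seen) := by
  induction seen using List.reverseRecOn with
  | nil => simp [pvTable, PySem.List.enumerate_nil, PySem.Dict.contains_empty]
  | append_singleton l a ih =>
    rw [pvTable_append, PySem.Dict.contains_insert, ih]
    by_cases h : n = a <;> by_cases h2 : n ∈ l <;> simp [h, h2]

-- the counter loop maintains (pvTable seen, |seen|)
lemma pvIns_table (seen : List String) (n : String) :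
    pvIns (pvTable seen, (seen.length : Int)) n =
      (pvTable (PySem.Set.add seen n), ((PySem.Set.add seen n).length : Int)) := by
  unfold pvIns PySem.Set.add
  rw [pvTable_contains]
  by_cases h : n ∈ seen
  · simp [h, PySem.Set.contains_eq_listContains]
  · have hc : PySem.Set.contains seen n = false := by
      simp [PySem.Set.contains_eq_listContains, h]
    simp only [h, decide_false, Bool.false_eq_true, if_false, hc, pvTable_append]
    simp

lemma pvFoldl_table (l : List String) : ∀ (seen : List String),
    l.foldl pvIns (pvTable seen, (seen.length : Int)) =
      (pvTable (PySem.Set.update seen l), ((PySem.Set.update seen l).length : Int)) := by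
  induction l with
  | nil => intro seen; rfl
  | cons n l ih =>
    intro seen
    simp only [List.foldl_cons, pvIns_table]
    rw [ih]
    rfl

lemma pvFinal_eq_table (stream : List String) :
    (stream.foldl pvIns (PySem.Dict.empty, 0)).1 = pvTable (PySem.Set.ofList stream) := by
  have h0 : (PySem.Dict.empty, (0 : Int)) =
      (pvTable ([] : List String), (([] : List String).length : Int)) := rfl
  rw [h0, pvFoldl_table]
  rfl

-- ===== VERDICT (by name: the statement is the Claim_ definition above) =====
theorem normalize_dataflow_spec : Claim_equal_normalize_dataflow := by
  intro dataflow _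
  unfold Spec_normalize_dataflow
  rw [normalize_dataflow_eq_named]
  have hA := pvMain dataflow (PySem.Dict.empty, 0) []
  simp only [List.nil_append] at hA
  rw [hA, pvFoldlItem_eq_stream, pvFinal_eq_table]
  unfold normalize_dataflow_alt
  simp only [PySem.List.dedup_eq_ofList]
  rfl
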